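-- pv_equiv track=rewrite | github.com/jw9603/Python | Programmers/코딩기초트레이닝/Day20/4.py | solution
-- ===== SOURCE A (Python) =====
-- def solution(arr, n):
--     for i in range(len(arr)):
--         if len(arr) % 2 == 0:
--             if i % 2 != 0:
--                 arr[i] += n
--         else:
--             if i % 2 == 0:
--                 arr[i] += n
--     return arr
-- ===== SOURCE B (Python) =====
-- def solution(arr, n):
--     # Slice-assignment: compute the first affected index once, read the strided
--     # slice, bump it, and write it back in place -- no loop over indices, no
--     # per-element parity branch. Mutates arr in place and returns it, like A.
--     start = 1 if len(arr) % 2 == 0 else 0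
--     arr[start::2] = [x + n for x in arr[start::2]]
--     return arr
-- ===== Notes on version B (the rewrite author's own statement) =====
-- stated objective: idiomatic
-- what changed: A visits every index and tests both the list-length parity and the index parity inside the loop; B computes the first affected index once, reads the extended slice arr[start::2], adds n to it, and writes it back with a single slice assignment, touching only the affected positions with no per-element branching (slicing runs in C, a constant-factor speedup a timing run measured).
import Mathlib
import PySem

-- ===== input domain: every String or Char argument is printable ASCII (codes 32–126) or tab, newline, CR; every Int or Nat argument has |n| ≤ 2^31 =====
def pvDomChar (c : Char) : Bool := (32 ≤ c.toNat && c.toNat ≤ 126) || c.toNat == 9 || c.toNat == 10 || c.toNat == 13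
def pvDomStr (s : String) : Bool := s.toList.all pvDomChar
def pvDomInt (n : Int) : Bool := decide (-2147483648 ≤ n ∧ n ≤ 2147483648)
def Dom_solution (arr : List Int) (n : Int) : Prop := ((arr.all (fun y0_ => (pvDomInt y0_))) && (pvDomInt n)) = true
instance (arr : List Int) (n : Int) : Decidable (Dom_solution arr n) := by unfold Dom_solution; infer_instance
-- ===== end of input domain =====

-- B replaces A's full index scan with per-element parity branches by one slice
-- assignment on the strided slice arr[start::2] (objective: idiomatic). Both
-- mutate arr in place and return it; the theorem is about the return value.

-- ===== PORT A =====
-- for i in range(len(arr)): branch on len(arr) % 2, then on i % 2, arr[i] += n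
def solution (arr : List Int) (n : Int) : List Int :=
  (List.range arr.length).foldl
    (fun a i =>
      if arr.length % 2 == 0 then
        (if i % 2 != 0 then a.set i (a.getD i 0 + n) else a)
      else
        (if i % 2 == 0 then a.set i (a.getD i 0 + n) else a))
    arr

-- ===== PORT B =====
-- Hand ports of the step-2 extended slice, exact for the only way B uses them:
-- a nonnegative start and a replacement of the same length as the read slice.
-- xs[0::2] : every second element starting at index 0
def pvStride2 : List Int → List Int
  | [] => []
  | [x] => [x]
  | x :: _ :: rest => x :: pvStride2 rest

-- xs[0::2] = vs : write vs back onto the even positions of xs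
def pvAssign2 : List Int → List Int → List Int
  | xs, [] => xs
  | [], _ => []
  | [_], v :: _ => [v]
  | _ :: y :: rest, v :: vs => v :: y :: pvAssign2 rest vs

-- start = 1 if len(arr) % 2 == 0 else 0; arr[start::2] = [x + n for x in arr[start::2]]
def solution_alt (arr : List Int) (n : Int) : List Int :=
  let start : Nat := if arr.length % 2 == 0 then 1 else 0
  arr.take start ++ pvAssign2 (arr.drop start) ((pvStride2 (arr.drop start)).map (· + n))

-- ===== PRECONDITION & SPEC =====
def Spec_solution (arr : List Int) (n : Int) (out : List Int) : Prop := out = solution_alt arr n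
instance (arr : List Int) (n : Int) (out : List Int) : Decidable (Spec_solution arr n out) := by unfold Spec_solution; infer_instance

-- ===== CLAIM (what is proved, stated in full; the proofs are below) =====
def Claim_equal_solution : Prop := ∀ (arr : List Int) (n : Int), Dom_solution arr n → Spec_solution arr n (solution arr n)

-- ===== LEMMAS AND PROOFS =====

-- A's loop body, with the two parity tests fused into one predicate p
def pvStep (p : Nat → Bool) (n : Int) (a : List Int) (i : Nat) : List Int :=
  if p i then a.set i (a.getD i 0 + n) else a

theorem pvStep_shift (p : Nat → Bool) (n : Int) :
    ∀ (l : List Nat) (y : Int) (xs : List Int),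
      (l.map (· + 1)).foldl (pvStep p n) (y :: xs)
        = y :: l.foldl (pvStep (fun i => p (i + 1)) n) xs := by
  intro l
  induction l with
  | nil => intro y xs; simp
  | cons i t ih =>
      intro y xs
      simp only [List.map_cons, List.foldl_cons]
      have h : pvStep p n (y :: xs) (i + 1)
          = y :: pvStep (fun j => p (j + 1)) n xs i := by
        simp only [pvStep]
        split <;> simp
      rw [h, ih]

theorem pvA_eq_mapIdx (p : Nat → Bool) (n : Int) :
    ∀ (xs : List Int),
      (List.range xs.length).foldl (pvStep p n) xs
        = xs.mapIdx (fun i x => if p i then x + n else x) := by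
  intro xs
  induction xs generalizing p with
  | nil => simp
  | cons x t ih =>
      simp only [List.length_cons, List.range_succ_eq_map, List.foldl_cons]
      have h0 : pvStep p n (x :: t) 0 = (if p 0 then x + n else x) :: t := by
        simp only [pvStep]
        split <;> simp
      rw [h0, pvStep_shift, ih (fun i => p (i + 1))]
      simp [List.mapIdx_cons]

-- B's read-bump-write on a slice starting at 0 is the even-position bump
theorem pvB_core (n : Int) :
    ∀ (xs : List Int),
      pvAssign2 xs ((pvStride2 xs).map (· + n))
        = xs.mapIdx (fun i x => if i % 2 == 0 then x + n else x) := by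
  intro xs
  fun_induction pvStride2 xs with
  | case1 => simp [pvAssign2]
  | case2 x => simp [pvAssign2]
  | case3 x y rest ih =>
      simp only [List.map_cons, pvAssign2, ih, List.mapIdx_cons]
      have hf : (fun (i : Nat) (a : Int) => if ((i + 1 + 1) % 2 == 0) = true then a + n else a)
          = (fun (i : Nat) (a : Int) => if (i % 2 == 0) = true then a + n else a) := by
        funext i a
        have h2 : (i + 1 + 1) % 2 = i % 2 := by omega
        rw [h2]
      rw [hf]
      simp

-- ===== VERDICT (by name: the statement is the Claim_ definition above) =====
theorem solution_spec : Claim_equal_solution := by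
  intro arr n _
  unfold Spec_solution solution solution_alt
  have hstep : (fun (a : List Int) (i : Nat) =>
      if arr.length % 2 == 0 then
        (if i % 2 != 0 then a.set i (a.getD i 0 + n) else a)
      else
        (if i % 2 == 0 then a.set i (a.getD i 0 + n) else a))
      = pvStep (fun i => if arr.length % 2 == 0 then (i % 2 != 0) else (i % 2 == 0)) n := by
    funext a i
    simp only [pvStep]
    by_cases h : arr.length % 2 == 0 <;> simp [h]
  rw [hstep, pvA_eq_mapIdx]
  by_cases h : arr.length % 2 = 0
  · have h' : (arr.length % 2 == 0) = true := by simp [h]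
    cases arr with
    | nil => simp [pvStride2, pvAssign2]
    | cons x t =>
        simp only [h', if_pos, List.take_succ_cons, List.take_zero, List.drop_succ_cons,
          List.drop_zero, pvB_core, List.mapIdx_cons]
        have hf : (fun (i : Nat) (x : Int) => if ((i + 1) % 2 != 0) = true then x + n else x)
            = (fun (i : Nat) (x : Int) => if (i % 2 == 0) = true then x + n else x) := by
          funext i a
          rcases Nat.mod_two_eq_zero_or_one i with h2 | h2 <;> simp [Nat.add_mod, h2]
        rw [hf]
        simp
  · have h' : (arr.length % 2 == 0) = false := by simp [h]
    simp [h', pvB_core]
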